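-- pv_equiv track=rewrite | github.com/Skizzzz/NOC_Toolkit | src/blueprints/config/routes.py | _parse_hosts_field
-- ===== SOURCE A (Python) =====
-- from typing import Optional
--
-- def _parse_hosts_field(value: Optional[str]) -> list:
--     """Parse hosts from comma or newline separated input."""
--     hosts = []
--     seen = set()
--     for chunk in (value or "").splitlines():
--         for part in chunk.split(","):
--             h = part.strip()
--             if h and h not in seen:
--                 hosts.append(h)
--                 seen.add(h)
--     return hosts
-- ===== SOURCE B (Python) =====
-- from typing import Optional
--
-- def _parse_hosts_field(value: Optional[str]) -> list:
--     """Parse hosts from comma or newline separated input.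
--
--     Single character-level scan: ',', '\n' and '\r' all act as token
--     delimiters (so "\r\n" just yields an extra empty token, which is
--     dropped); each flushed token is stripped and recorded once, in
--     first-occurrence order, in an insertion-ordered dict."""
--     seen = {}
--     buf = []
--     for ch in (value or "") + ",":
--         if ch in ",\n\r":
--             h = "".join(buf).strip()
--             buf = []
--             if h:
--                 seen.setdefault(h, None)
--         else:
--             buf.append(ch)
--     return list(seen)
-- ===== Notes on version B (the rewrite author's own statement) =====
-- stated objective: alternative
-- what changed: Replaces A's nested splitlines/split(",") passes with seen-set bookkeeping by a single character-level scan: a state machine over (value or "")+"," that treats ',', '\n' and '\r' alike as token delimiters, flushing each stripped token into an insertion-ordered dict.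
import Mathlib
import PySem

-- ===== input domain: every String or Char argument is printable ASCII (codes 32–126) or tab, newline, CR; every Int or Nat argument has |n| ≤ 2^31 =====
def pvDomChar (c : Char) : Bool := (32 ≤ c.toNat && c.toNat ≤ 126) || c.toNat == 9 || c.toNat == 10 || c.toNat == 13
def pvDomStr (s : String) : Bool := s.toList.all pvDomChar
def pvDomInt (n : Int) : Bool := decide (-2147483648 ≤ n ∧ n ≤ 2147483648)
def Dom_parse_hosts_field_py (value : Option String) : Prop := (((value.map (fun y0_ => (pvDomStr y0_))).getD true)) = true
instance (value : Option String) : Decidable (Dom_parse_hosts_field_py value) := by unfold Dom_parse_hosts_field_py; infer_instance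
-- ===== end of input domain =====

-- B replaces A's nested splitlines/split(",") passes by a single character-level scan that treats
-- ',', '\n', '\r' as delimiters and flushes stripped tokens into an insertion-ordered dict: an
-- alternative one-pass state-machine algorithm of the same cost.


-- ===== PORT A =====
def parse_hosts_field_py (value : Option String) : List String :=
  let st :=
    (PySem.Str.splitlines (value.getD "")).foldl
      (fun (st : List String × PySem.Set String) chunk =>
        ((PySem.Str.split? chunk ",").getD []).foldl
          (fun st part =>
            let h := PySem.Str.strip part
            if h ≠ "" ∧ PySem.Set.contains st.2 h = false then
              (st.1 ++ [h], PySem.Set.add st.2 h)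
            else st)
          st)
      ([], PySem.Set.empty)
  st.1

-- ===== PORT B =====
-- B iterates over the characters of (value or "") + "," one at a time; the state is the current
-- token buffer plus the insertion-ordered key list of the `seen` dict (values are all None).
def parse_hosts_field_py_alt (value : Option String) : List String :=
  let st :=
    ((value.getD "").toList ++ [',']).foldl
      (fun (st : List Char × List (List Char)) ch =>
        if ch = ',' ∨ ch = '\n' ∨ ch = '\r' then
          let h := PySem.Chars.strip st.1
          (([] : List Char), if h ≠ [] ∧ h ∉ st.2 then st.2 ++ [h] else st.2)
        else (st.1 ++ [ch], st.2))
      ([], [])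
  st.2.map String.ofList

-- ===== PRECONDITION & SPEC =====
def Spec_parse_hosts_field_py (value : Option String) (out : List String) : Prop := out = parse_hosts_field_py_alt value
instance (value : Option String) (out : List String) : Decidable (Spec_parse_hosts_field_py value out) := by unfold Spec_parse_hosts_field_py; infer_instance

-- ===== CLAIM (what is proved, stated in full; the proofs are below) =====
def Claim_equal_parse_hosts_field_py : Prop := ∀ (value : Option String), Dom_parse_hosts_field_py value → Spec_parse_hosts_field_py value (parse_hosts_field_py value)

-- ===== LEMMAS AND PROOFS =====

-- Both programs' tokenisation, in two flavours: split on ',' only (A's inner pass) and split on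
-- any of ',', '\n', '\r' (B's one-pass view); empty pieces disappear after strip + filter, which
-- is why the two views flatten to the same token list on the ASCII domain.
def pvCPieces : List Char → List (List Char)
  | [] => [[]]
  | c :: cs => if c = ',' then [] :: pvCPieces cs else (pvCPieces cs).modifyHead (c :: ·)

def pvPieces : List Char → List (List Char)
  | [] => [[]]
  | c :: cs => if c = ',' ∨ c = '\n' ∨ c = '\r' then [] :: pvPieces cs else (pvPieces cs).modifyHead (c :: ·)

def pvTokLine (l : List Char) : List (List Char) := ((pvCPieces l).map PySem.Chars.strip).filter (· ≠ [])
def pvTok (l : List Char) : List (List Char) := ((pvPieces l).map PySem.Chars.strip).filter (· ≠ [])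
def pvAdd (seen : List (List Char)) (h : List Char) : List (List Char) :=
  if h ∈ seen then seen else seen ++ [h]

theorem pvCPieces_ne_nil (l : List Char) : pvCPieces l ≠ [] := by
  cases l with
  | nil => simp [pvCPieces]
  | cons c cs =>
    simp only [pvCPieces]; split
    · simp
    · exact fun h => (pvCPieces_ne_nil cs) (List.modifyHead_eq_nil_iff.mp h)

theorem pvPieces_ne_nil (l : List Char) : pvPieces l ≠ [] := by
  cases l with
  | nil => simp [pvPieces]
  | cons c cs =>
    simp only [pvPieces]; split
    · simp
    · exact fun h => (pvPieces_ne_nil cs) (List.modifyHead_eq_nil_iff.mp h)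

theorem pvModifyHead_append (a b : List (List Char)) (f : List Char → List Char) (h : a ≠ []) :
    (a ++ b).modifyHead f = a.modifyHead f ++ b := by
  cases a with
  | nil => exact absurd rfl h
  | cons x t => simp

theorem pvPieces_append_delim (d : Char) (hd : d = ',' ∨ d = '\n' ∨ d = '\r') (a b : List Char) :
    pvPieces (a ++ d :: b) = pvPieces a ++ pvPieces b := by
  induction a with
  | nil => simp [pvPieces, hd]
  | cons c t ih =>
    simp only [List.cons_append, pvPieces]
    split
    · simp [ih]
    · rw [ih, pvModifyHead_append _ _ _ (pvPieces_ne_nil t)]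

theorem pvCPieces_eq_pvPieces (l : List Char) (h : ∀ c ∈ l, ¬(c = '\n' ∨ c = '\r')) :
    pvCPieces l = pvPieces l := by
  induction l with
  | nil => rfl
  | cons c t ih =>
    have hc := h c (by simp)
    have ht : ∀ c ∈ t, ¬(c = '\n' ∨ c = '\r') := fun x hx => h x (by simp [hx])
    simp only [pvCPieces, pvPieces]
    by_cases hcc : c = ','
    · simp [hcc, ih ht]
    · rw [if_neg hcc, if_neg (by tauto), ih ht]

theorem pvPieces_no_delim (l : List Char) (h : ∀ c ∈ l, ¬(c = ',' ∨ c = '\n' ∨ c = '\r')) :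
    pvPieces l = [l] := by
  induction l with
  | nil => rfl
  | cons c t ih =>
    have hc := h c (by simp)
    simp only [pvPieces, if_neg hc]
    rw [ih (fun x hx => h x (by simp [hx]))]
    rfl

theorem pvSplitOnGo (fuel : Nat) : ∀ (l cur : List Char) (acc : List (List Char)), l.length < fuel →
    PySem.Chars.splitOn.go [','] fuel l cur acc
      = acc.reverse ++ (pvCPieces l).modifyHead (cur.reverse ++ ·) := by
  induction fuel with
  | zero => intro l cur acc h; omega
  | succ n ih =>
    intro l cur acc h
    cases l with
    | nil =>
      rw [PySem.Chars.splitOn.go.eq_def]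
      simp [pvCPieces]
    | cons c rest =>
      rw [PySem.Chars.splitOn.go.eq_def]
      by_cases hc : c = ','
      · subst hc
        have hpre : ([','] : List Char).isPrefixOf (',' :: rest) = true := by simp [List.isPrefixOf]
        simp only [hpre, if_true, List.length_cons, List.length_nil, List.drop_succ_cons, List.drop_zero]
        rw [ih rest [] (cur.reverse :: acc) (by simpa using Nat.lt_of_succ_lt_succ h)]
        rcases hp : pvCPieces rest with _ | ⟨p, ps⟩ <;> simp [pvCPieces, hp]
      · have hpre : ([','] : List Char).isPrefixOf (c :: rest) = false := by
          simp [List.isPrefixOf]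
          intro hcc
          exact absurd hcc.symm hc
        simp only [hpre, Bool.false_eq_true, if_false]
        rw [ih rest (c :: cur) acc (by simpa using Nat.lt_of_succ_lt_succ h)]
        simp only [pvCPieces, if_neg hc]
        rcases hp : pvCPieces rest with _ | ⟨p, ps⟩
        · exact absurd hp (pvCPieces_ne_nil rest)
        · simp

theorem pvSplitOn_comma (l : List Char) : PySem.Chars.splitOn l [','] = pvCPieces l := by
  unfold PySem.Chars.splitOn
  rw [pvSplitOnGo (l.length + 1) l [] [] (by omega)]
  rcases hp : pvCPieces l with _ | ⟨p, ps⟩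
  · exact absurd hp (pvCPieces_ne_nil l)
  · simp


theorem pvStrip_nil : PySem.Chars.strip [] = [] := rfl

theorem pvTok_nil : pvTok [] = [] := by simp [pvTok, pvPieces, pvStrip_nil]

theorem pvTok_append_delim (d : Char) (hd : d = ',' ∨ d = '\n' ∨ d = '\r') (a b : List Char) :
    pvTok (a ++ d :: b) = pvTok a ++ pvTok b := by
  simp [pvTok, pvPieces_append_delim d hd]

theorem pvTok_delim_cons (d : Char) (hd : d = ',' ∨ d = '\n' ∨ d = '\r') (b : List Char) :
    pvTok (d :: b) = pvTok b := by
  have := pvTok_append_delim d hd [] b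
  simpa [pvTok_nil] using this

theorem pvTokLine_eq_pvTok (l : List Char) (h : ∀ c ∈ l, ¬(c = '\n' ∨ c = '\r')) :
    pvTokLine l = pvTok l := by
  simp [pvTokLine, pvTok, pvCPieces_eq_pvPieces l h]

theorem pvGo_nil (isB : Char → Bool) (cur : List Char) (acc : List (List Char)) :
    PySem.Chars.splitlines.go isB [] cur acc
      = if cur.isEmpty then acc.reverse else (cur.reverse :: acc).reverse := by
  rw [PySem.Chars.splitlines.go.eq_def]

theorem pvGo_crlf (isB : Char → Bool) (rest cur : List Char) (acc : List (List Char)) :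
    PySem.Chars.splitlines.go isB ('\r'::'\n'::rest) cur acc
      = PySem.Chars.splitlines.go isB rest [] (cur.reverse::acc) := by
  rw [PySem.Chars.splitlines.go.eq_def]; split
  · simp_all
  · simp_all
  · rename_i nh heq
    injection heq with h1 h2
    exact absurd h2.symm (nh rest h1.symm)

theorem pvGo_cons (isB : Char → Bool) (c : Char) (rest cur : List Char) (acc : List (List Char))
    (h : ¬ (c = '\r' ∧ ∃ t, rest = '\n'::t)) :
    PySem.Chars.splitlines.go isB (c::rest) cur acc
      = if isB c then PySem.Chars.splitlines.go isB rest [] (cur.reverse::acc)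
        else PySem.Chars.splitlines.go isB rest (c::cur) acc := by
  rw [PySem.Chars.splitlines.go.eq_def]; split
  · simp_all
  · rename_i heq
    injection heq with h1 h2
    exact absurd ⟨h1, h2 ▸ ⟨_, rfl⟩⟩ h
  · rename_i nh heq
    injection heq with h1 h2
    subst h1; subst h2; rfl

theorem pvA_main (isB : Char → Bool)
    (hisB : ∀ c, pvDomChar c = true → (isB c = true ↔ (c = '\n' ∨ c = '\r'))) :
    ∀ (n : Nat) (s cur : List Char) (acc : List (List Char)), s.length ≤ n →
    (∀ c ∈ s, pvDomChar c = true) → (∀ c ∈ cur, ¬(c = '\n' ∨ c = '\r')) →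
    (PySem.Chars.splitlines.go isB s cur acc).flatMap pvTokLine
      = acc.reverse.flatMap pvTokLine ++ pvTok (cur.reverse ++ s) := by
  intro n
  induction n with
  | zero =>
    intro s cur acc hlen _ hcur
    have hs : s = [] := List.length_eq_zero_iff.mp (Nat.le_zero.mp hlen)
    subst hs
    rw [pvGo_nil]
    by_cases hc : cur = []
    · simp [hc, pvTok_nil]
    · rw [if_neg (by simp [hc])]
      simp [pvTokLine_eq_pvTok _ (fun x hx => hcur x (List.mem_reverse.mp hx))]
  | succ n ih =>
    intro s cur acc hlen hdom hcur
    cases s with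
    | nil =>
      rw [pvGo_nil]
      by_cases hc : cur = []
      · simp [hc, pvTok_nil]
      · rw [if_neg (by simp [hc])]
        simp [pvTokLine_eq_pvTok _ (fun x hx => hcur x (List.mem_reverse.mp hx))]
    | cons c rest =>
      by_cases hp : c = '\r' ∧ ∃ t, rest = '\n'::t
      · obtain ⟨hc, t, ht⟩ := hp
        subst hc; subst ht
        rw [pvGo_crlf]
        rw [ih t [] (cur.reverse :: acc) (by simp at hlen ⊢; omega)
              (fun x hx => hdom x (by simp [hx])) (by simp)]
        rw [pvTok_append_delim '\r' (by simp) cur.reverse ('\n'::t),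
            pvTok_delim_cons '\n' (by simp) t]
        simp [pvTokLine_eq_pvTok _ (fun x hx => hcur x (List.mem_reverse.mp hx))]
      · rw [pvGo_cons isB c rest cur acc hp]
        have hdc : pvDomChar c = true := hdom c (by simp)
        by_cases hb : isB c = true
        · have hcd : c = '\n' ∨ c = '\r' := (hisB c hdc).mp hb
          rw [if_pos hb]
          rw [ih rest [] (cur.reverse :: acc) (by simp at hlen ⊢; omega)
                (fun x hx => hdom x (by simp [hx])) (by simp)]
          rw [pvTok_append_delim c (by tauto) cur.reverse rest]
          simp [pvTokLine_eq_pvTok _ (fun x hx => hcur x (List.mem_reverse.mp hx))]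
        · have hcd : ¬(c = '\n' ∨ c = '\r') := fun h => hb ((hisB c hdc).mpr h)
          rw [if_neg hb]
          rw [ih rest (c :: cur) acc (by simp at hlen ⊢; omega)
                (fun x hx => hdom x (by simp [hx]))
                (by intro x hx; rcases List.mem_cons.mp hx with h | h
                    · subst h; exact hcd
                    · exact hcur x h)]
          simp [List.append_assoc]

theorem pvChar_eq_of_toNat (c d : Char) (h : c.toNat = d.toNat) : c = d :=
  Char.ext (UInt32.toNat_inj.mp h)

theorem pvOfList_injective : Function.Injective String.ofList := fun a b h => by
  have := congrArg String.toList h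
  simpa [String.toList_ofList] using this

theorem pvIsB_iff (c : Char) (h : pvDomChar c = true) :
    ((decide (c.toNat = 10) || decide (c.toNat = 13) || decide (c.toNat = 11) ||
      decide (c.toNat = 12) || decide (c.toNat = 28) || decide (c.toNat = 29) ||
      decide (c.toNat = 30) || decide (c.toNat = 133) || decide (c.toNat = 8232) ||
      decide (c.toNat = 8233)) = true) ↔ (c = '\n' ∨ c = '\r') := by
  constructor
  · intro hb
    simp only [pvDomChar, Bool.or_eq_true, Bool.and_eq_true, decide_eq_true_eq,
      Nat.beq_eq_true_eq] at h hb
    have : c.toNat = 10 ∨ c.toNat = 13 := by omega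
    rcases this with h10 | h13
    · exact Or.inl (pvChar_eq_of_toNat c '\n' (by rw [h10]; rfl))
    · exact Or.inr (pvChar_eq_of_toNat c '\r' (by rw [h13]; rfl))
  · rintro (rfl | rfl) <;> decide

theorem pvA_flat (s : List Char) (hdom : ∀ c ∈ s, pvDomChar c = true) :
    (PySem.Chars.splitlines s).flatMap pvTokLine = pvTok s := by
  have := pvA_main
      (fun c => decide (c.toNat = 10) || decide (c.toNat = 13) || decide (c.toNat = 11) ||
        decide (c.toNat = 12) || decide (c.toNat = 28) || decide (c.toNat = 29) ||
        decide (c.toNat = 30) || decide (c.toNat = 133) || decide (c.toNat = 8232) ||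
        decide (c.toNat = 8233))
      (fun c hc => pvIsB_iff c hc) s.length s [] [] le_rfl hdom (by simp)
  simpa [PySem.Chars.splitlines] using this


theorem pvFlush (buf : List Char) (seen : List (List Char))
    (hb : ∀ c ∈ buf, ¬(c = ',' ∨ c = '\n' ∨ c = '\r')) :
    (if PySem.Chars.strip buf ≠ [] ∧ PySem.Chars.strip buf ∉ seen
     then seen ++ [PySem.Chars.strip buf] else seen)
      = (pvTok buf).foldl pvAdd seen := by
  have hp : pvTok buf = if PySem.Chars.strip buf = [] then [] else [PySem.Chars.strip buf] := by
    simp only [pvTok, pvPieces_no_delim buf hb, List.map_cons, List.map_nil]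
    by_cases h : PySem.Chars.strip buf = [] <;> simp [h]
  rw [hp]
  by_cases h1 : PySem.Chars.strip buf = []
  · simp [h1]
  · by_cases h2 : PySem.Chars.strip buf ∈ seen <;> simp [h1, h2, pvAdd]

theorem pvScan : ∀ (s buf : List Char) (seen : List (List Char)),
    (∀ c ∈ buf, ¬(c = ',' ∨ c = '\n' ∨ c = '\r')) →
    ((s ++ [',']).foldl
      (fun (st : List Char × List (List Char)) ch =>
        if ch = ',' ∨ ch = '\n' ∨ ch = '\r' then
          let h := PySem.Chars.strip st.1
          (([] : List Char), if h ≠ [] ∧ h ∉ st.2 then st.2 ++ [h] else st.2)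
        else (st.1 ++ [ch], st.2))
      (buf, seen))
      = ([], (pvTok (buf ++ s)).foldl pvAdd seen) := by
  intro s
  induction s with
  | nil =>
    intro buf seen hb
    simp only [List.nil_append, List.append_nil, List.foldl_cons, List.foldl_nil]
    rw [if_pos (Or.inl trivial), pvFlush buf seen hb]
  | cons c cs ih =>
    intro buf seen hb
    by_cases hc : c = ',' ∨ c = '\n' ∨ c = '\r'
    · simp only [List.cons_append, List.foldl_cons, if_pos hc]
      rw [ih [] _ (by simp)]
      rw [pvTok_append_delim c hc buf cs]
      rw [List.foldl_append]
      rw [pvFlush buf seen hb]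
      simp
    · simp only [List.cons_append, List.foldl_cons, if_neg hc]
      have := ih (buf ++ [c]) seen (by
        intro x hx
        rcases List.mem_append.mp hx with h | h
        · exact hb x h
        · simp at h; subst h; exact hc)
      simpa [List.append_assoc] using this

theorem pvFilterMap (parts : List String) :
    parts.filterMap (fun part =>
        let h := PySem.Str.strip part
        if h = "" then none else some h)
      = (((parts.map String.toList).map PySem.Chars.strip).filter (· ≠ [])).map String.ofList := by
  induction parts with
  | nil => rfl
  | cons p t ih =>
    simp only [List.filterMap_cons, List.map_cons, List.filter_cons]
    by_cases he : PySem.Str.strip p = ""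
    · have : PySem.Chars.strip p.toList = [] := by
        rw [← PySem.Str.toList_strip, he]
        rfl
      simp [he, this, ih]
    · have hne : PySem.Chars.strip p.toList ≠ [] := by
        rw [← PySem.Str.toList_strip]
        exact fun h => he (String.toList_inj.mp h)
      have hofl : PySem.Str.strip p = String.ofList (PySem.Chars.strip p.toList) := by
        rw [← PySem.Str.toList_strip, String.ofList_toList]
      simp [hne, ih, hofl]

theorem pvFLine (line : String) :
    ((PySem.Str.split? line ",").getD []).filterMap (fun part =>
        let h := PySem.Str.strip part
        if h = "" then none else some h)
      = (pvTokLine line.toList).map String.ofList := by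
  have hmap := PySem.Str.split?_map line ","
  have hchars : PySem.Chars.split? line.toList (",":String).toList
      = some (pvCPieces line.toList) := by
    have : (",":String).toList = [','] := rfl
    rw [this]
    simp [PySem.Chars.split?, pvSplitOn_comma]
  rw [hchars] at hmap
  cases hsp : PySem.Str.split? line "," with
  | none => rw [hsp] at hmap; simp at hmap
  | some parts =>
    rw [hsp] at hmap
    simp only [Option.map_some, Option.some_inj] at hmap
    simp only [Option.getD_some]
    rw [pvFilterMap parts, hmap]
    rfl

theorem pvTA (v : String) (hdom : ∀ c ∈ v.toList, pvDomChar c = true) :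
    (PySem.Str.splitlines v).flatMap (fun line =>
        ((PySem.Str.split? line ",").getD []).filterMap (fun part =>
          let h := PySem.Str.strip part
          if h = "" then none else some h))
      = (pvTok v.toList).map String.ofList := by
  rw [List.flatMap_congr (fun line _ => pvFLine line)]
  have h2 : (PySem.Str.splitlines v).flatMap (fun line => (pvTokLine line.toList).map String.ofList)
      = ((PySem.Str.splitlines v).map String.toList).flatMap (fun lc => (pvTokLine lc).map String.ofList) :=
    (List.flatMap_map String.toList (fun lc => (pvTokLine lc).map String.ofList) (PySem.Str.splitlines v)).symm
  rw [h2, PySem.Str.splitlines_map_toList]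
  rw [show (fun lc => (pvTokLine lc).map String.ofList) = (fun lc => List.map String.ofList (pvTokLine lc)) from rfl]
  rw [← List.map_flatMap]
  rw [pvA_flat v.toList hdom]

theorem pvDedupMap : ∀ (l seen : List (List Char)),
    List.foldl PySem.Set.add (seen.map String.ofList) (l.map String.ofList)
      = (l.foldl pvAdd seen).map String.ofList := by
  intro l
  induction l with
  | nil => intro seen; rfl
  | cons x t ih =>
    intro seen
    simp only [List.map_cons, List.foldl_cons]
    by_cases hx : x ∈ seen
    · have hc : PySem.Set.add (seen.map String.ofList) (String.ofList x) = seen.map String.ofList := by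
        simp [PySem.Set.add, PySem.Set.contains, List.mem_map_of_injective pvOfList_injective, hx]
      rw [hc, show pvAdd seen x = seen from by simp [pvAdd, hx], ih]
    · have hc : PySem.Set.add (seen.map String.ofList) (String.ofList x)
          = (seen ++ [x]).map String.ofList := by
        simp [PySem.Set.add, PySem.Set.contains, List.mem_map_of_injective pvOfList_injective, hx]
      rw [hc, show pvAdd seen x = seen ++ [x] from by simp [pvAdd, hx], ih]

theorem pv_diag (hs : List String) (s : PySem.Set String) :
    hs.foldl
      (fun (st : List String × PySem.Set String) h =>
        if h ≠ "" ∧ PySem.Set.contains st.2 h = false then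
          (st.1 ++ [h], PySem.Set.add st.2 h)
        else st) (s, s)
    = (let r := (hs.filter (fun h => h ≠ "")).foldl PySem.Set.add s
       (r, r)) := by
  induction hs generalizing s with
  | nil => rfl
  | cons h rest ih =>
    simp only [List.foldl_cons, List.filter_cons]
    by_cases he : h = ""
    · subst he
      rw [if_neg (by simp)]
      simp only [ne_eq, not_true_eq_false, decide_false]
      exact ih s
    · simp only [ne_eq, he, not_false_eq_true, decide_true, if_true]
      rw [List.foldl_cons]
      by_cases hm : h ∈ s
      · rw [if_neg (by simp [PySem.Set.contains, hm])]
        have hadd : PySem.Set.add s h = s := by simp [PySem.Set.add, PySem.Set.contains, hm]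
        rw [hadd]
        exact ih s
      · have hc : PySem.Set.contains s h = false := by
          simp [PySem.Set.contains, hm]
        rw [if_pos ⟨trivial, hc⟩]
        have hadd : (s ++ [h] : PySem.Set String) = PySem.Set.add s h := by
          simp [PySem.Set.add, hm]
        rw [hadd]
        exact ih _

theorem pv_inner (ts : List String) (s : PySem.Set String) :
    ts.foldl
      (fun (st : List String × PySem.Set String) part =>
        let h := PySem.Str.strip part
        if h ≠ "" ∧ PySem.Set.contains st.2 h = false then
          (st.1 ++ [h], PySem.Set.add st.2 h)
        else st) (s, s)
    = (let r := (ts.filterMap (fun part =>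
          let h := PySem.Str.strip part
          if h = "" then none else some h)).foldl PySem.Set.add s
       (r, r)) := by
  have hmap : ∀ (l : List String), l.filterMap (fun part =>
        if PySem.Str.strip part = "" then none else some (PySem.Str.strip part))
      = (l.map PySem.Str.strip).filter (fun h => h ≠ "") := by
    intro l
    induction l with
    | nil => rfl
    | cons p r ihr =>
      simp only [List.filterMap_cons, List.map_cons, List.filter_cons]
      by_cases he : PySem.Str.strip p = ""
      · simp [he, ihr]
      · simp [he, ihr]
  have := pv_diag (ts.map PySem.Str.strip) s
  rw [List.foldl_map] at this
  simp only [hmap]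
  exact this

theorem pv_outer (lines : List String) (s : PySem.Set String) :
    lines.foldl
      (fun (st : List String × PySem.Set String) chunk =>
        ((PySem.Str.split? chunk ",").getD []).foldl
          (fun st part =>
            let h := PySem.Str.strip part
            if h ≠ "" ∧ PySem.Set.contains st.2 h = false then
              (st.1 ++ [h], PySem.Set.add st.2 h)
            else st) st) (s, s)
    = (let r := (lines.flatMap (fun line =>
          ((PySem.Str.split? line ",").getD []).filterMap (fun part =>
            let h := PySem.Str.strip part
            if h = "" then none else some h))).foldl PySem.Set.add s
       (r, r)) := by
  induction lines generalizing s with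
  | nil => rfl
  | cons line rest ih =>
    simp only [List.foldl_cons, List.flatMap_cons, List.foldl_append]
    rw [pv_inner]
    exact ih _


theorem pvFinal (value : Option String)
    (hdom : ∀ c ∈ (value.getD "").toList, pvDomChar c = true) :
    parse_hosts_field_py value = parse_hosts_field_py_alt value := by
  simp only [parse_hosts_field_py, parse_hosts_field_py_alt]
  rw [show (([], PySem.Set.empty) : List String × PySem.Set String)
        = ((PySem.Set.empty : PySem.Set String), (PySem.Set.empty : PySem.Set String)) from rfl]
  rw [pv_outer]
  rw [pvScan (value.getD "").toList [] [] (by simp)]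
  simp only [List.nil_append]
  rw [pvTA (value.getD "") hdom]
  have : (PySem.Set.empty : PySem.Set String) = ([] : List (List Char)).map String.ofList := rfl
  rw [this, pvDedupMap]

-- ===== VERDICT (by name: the statement is the Claim_ definition above) =====
theorem parse_hosts_field_py_spec : Claim_equal_parse_hosts_field_py := by
  intro value hv
  unfold Spec_parse_hosts_field_py
  apply pvFinal value
  intro c hc
  cases value with
  | none => simp at hc
  | some s =>
    simp only [Dom_parse_hosts_field_py, Option.map_some, Option.getD_some, pvDomStr,
      List.all_eq_true] at hv
    exact hv c hc
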